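-- pv_equiv track=rewrite | github.com/yihui504/SBMF | contract/parser.py | _contains_multiple_documents
-- ===== SOURCE A (Python) =====
-- def _contains_multiple_documents(content: str) -> bool:
--     """检测 YAML 内容是否包含多个文档
--
--     Args:
--         content: YAML 字符串内容
--
--     Returns:
--         bool: 如果包含多个文档分隔符 '---' 返回 True
--
--     注意：
--     - 忽略文档开头的 '---'（第一个文档可能以 '---' 开头）
--     - 检测后续的 '---' 分隔符
--     """
--     lines = content.split("\n")
--
--     # 移除开头的空行
--     first_non_empty = 0
--     for i, line in enumerate(lines):
--         if line.strip():
--             first_non_empty = i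
--             break
--
--     # 检查是否有非开头的 '---'
--     # 跳过文档开头的 '---'（如果有）
--     start_index = first_non_empty
--     if start_index < len(lines) and lines[start_index].strip() == "---":
--         start_index += 1
--
--     # 检查后续是否有 '---'
--     for i in range(start_index, len(lines)):
--         line = lines[i].strip()
--         if line == "---":
--             return True
--
--     return False
-- ===== SOURCE B (Python) =====
-- def _contains_multiple_documents(content: str) -> bool:
--     # A '---' line is a non-leading document separator iff some non-empty line
--     # precedes it; the LAST '---' has the largest prefix, so it suffices to find
--     # the last '---' (reverse scan) and test whether any earlier line is non-empty.
--     stripped = [line.strip() for line in content.split("\n")]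
--     for j in range(len(stripped) - 1, -1, -1):
--         if stripped[j] == "---":
--             return any(stripped[:j])
--     return False
-- ===== Notes on version B (the rewrite author's own statement) =====
-- stated objective: alternative
-- what changed: Replaces A's forward skip-then-scan (find first non-empty line, conditionally skip a leading '---', then forward scan with early exit) by a backward scan based on a different characterization: a '---' line is a non-leading separator iff some non-empty line precedes it, and the last '---' has the largest prefix, so B reverse-scans to the last '---' and returns whether any earlier line is non-empty.
import Mathlib
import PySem

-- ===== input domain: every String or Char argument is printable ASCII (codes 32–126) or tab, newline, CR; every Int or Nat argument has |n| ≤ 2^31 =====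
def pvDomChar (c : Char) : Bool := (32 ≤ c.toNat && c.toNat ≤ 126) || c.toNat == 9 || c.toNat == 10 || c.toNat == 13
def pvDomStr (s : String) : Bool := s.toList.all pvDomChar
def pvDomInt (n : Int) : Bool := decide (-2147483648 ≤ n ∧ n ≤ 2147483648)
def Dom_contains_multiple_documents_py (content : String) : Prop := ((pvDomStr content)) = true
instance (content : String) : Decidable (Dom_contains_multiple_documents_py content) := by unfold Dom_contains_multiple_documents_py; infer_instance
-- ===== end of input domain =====

-- B replaces A's forward skip-then-scan by a backward scan: it finds the LAST '---' line and
-- returns whether any non-empty line precedes it (a '---' is a non-leading separator iff a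
-- non-empty line precedes it, and the last '---' maximizes that prefix). Objective: alternative.

-- ===== PORT A =====
-- 'for i, line in enumerate(lines): if line.strip(): first_non_empty = i; break' (stays 0 if never hit)
def pvFirstNonEmptyA : List String → Nat → Nat
  | [], _ => 0
  | l :: ls, i => if PySem.Str.strip l = "" then pvFirstNonEmptyA ls (i + 1) else i

-- 'for i in range(start_index, len(lines)): if lines[i].strip() == "---": return True / return False'
def pvScanA (lines : List String) (i : Nat) : Bool :=
  if _h : i < lines.length then
    if PySem.Str.strip (lines.getD i "") = "---" then true else pvScanA lines (i + 1)
  else false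
termination_by lines.length - i

def pvAcore (lines : List String) : Bool :=
  let first_non_empty := pvFirstNonEmptyA lines 0
  let start_index :=
    if first_non_empty < lines.length ∧ PySem.Str.strip (lines.getD first_non_empty "") = "---"
    then first_non_empty + 1 else first_non_empty
  pvScanA lines start_index

-- content.split("\n"): split? is some for the non-empty separator "\n", so .getD [] is exact
def contains_multiple_documents_py (content : String) : Bool :=
  pvAcore ((PySem.Str.split? content "\n").getD [])

-- ===== PORT B =====
-- 'for j in range(len(stripped) - 1, -1, -1): if stripped[j] == "---": return any(stripped[:j])'
-- transcribed as a count-down recursion; 'any' on strings tests truthiness (non-emptiness)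
def pvScanB (s : List String) : Nat → Bool
  | 0 => false
  | j + 1 =>
      if s.getD j "" = "---" then (s.take j).any (fun x => !(x == ""))
      else pvScanB s j

def contains_multiple_documents_py_alt (content : String) : Bool :=
  let stripped := ((PySem.Str.split? content "\n").getD []).map PySem.Str.strip
  pvScanB stripped stripped.length

-- ===== PRECONDITION & SPEC =====
def Spec_contains_multiple_documents_py (content : String) (out : Bool) : Prop := out = contains_multiple_documents_py_alt content
instance (content : String) (out : Bool) : Decidable (Spec_contains_multiple_documents_py content out) := by unfold Spec_contains_multiple_documents_py; infer_instance

-- ===== CLAIM (what is proved, stated in full; the proofs are below) =====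
def Claim_equal_contains_multiple_documents_py : Prop := ∀ (content : String), Dom_contains_multiple_documents_py content → Spec_contains_multiple_documents_py content (contains_multiple_documents_py content)

-- ===== LEMMAS AND PROOFS =====

-- the early-exit index scan is 'any' over the dropped suffix
theorem pvScanA_eq (lines : List String) (i : Nat) :
    pvScanA lines i = (lines.drop i).any (fun l => PySem.Str.strip l == "---") := by
  fun_induction pvScanA lines i with
  | case1 i h htrue =>
      rw [List.getD_eq_getElem lines "" h] at htrue
      rw [List.drop_eq_getElem_cons h, List.any_cons]
      simp [htrue]
  | case2 i h hfalse ih =>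
      rw [List.getD_eq_getElem lines "" h] at hfalse
      rw [ih]
      conv_rhs => rw [List.drop_eq_getElem_cons h, List.any_cons]
      simp [hfalse]
  | case3 i h =>
      rw [List.drop_eq_nil_of_le (by omega)]
      simp

theorem pvFirstNonEmptyA_shift (ls : List String) (i : Nat)
    (hne : ∃ l ∈ ls, PySem.Str.strip l ≠ "") :
    pvFirstNonEmptyA ls (i + 1) = pvFirstNonEmptyA ls i + 1 := by
  induction ls generalizing i with
  | nil => simp at hne
  | cons l ls ih =>
      by_cases hl : PySem.Str.strip l = ""
      · simp only [pvFirstNonEmptyA, if_pos hl]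
        apply ih
        rcases hne with ⟨x, hx, hxs⟩
        rcases List.mem_cons.mp hx with h | h
        · exact absurd (h ▸ hxs) (by simpa [h] using hl)
        · exact ⟨x, h, hxs⟩
      · simp [pvFirstNonEmptyA, hl]

theorem pvFirstNonEmptyA_allEmpty (ls : List String) (i : Nat)
    (h : ∀ l ∈ ls, PySem.Str.strip l = "") :
    pvFirstNonEmptyA ls i = 0 := by
  induction ls generalizing i with
  | nil => rfl
  | cons l ls ih =>
      simp only [pvFirstNonEmptyA, if_pos (h l (by simp))]
      exact ih _ (fun x hx => h x (by simp [hx]))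

-- A's skip-then-scan, expressed structurally on the line list
def pvGoL : List String → Bool
  | [] => false
  | l :: ls =>
      if PySem.Str.strip l = "" then pvGoL ls
      else if PySem.Str.strip l = "---" then ls.any (fun x => PySem.Str.strip x == "---")
      else (l :: ls).any (fun x => PySem.Str.strip x == "---")

theorem pvGoL_allEmpty (ls : List String) (h : ∀ l ∈ ls, PySem.Str.strip l = "") :
    pvGoL ls = false := by
  induction ls with
  | nil => rfl
  | cons l ls ih =>
      simp only [pvGoL, if_pos (h l (by simp))]
      exact ih (fun x hx => h x (by simp [hx]))

theorem pvAcore_eq_goL (lines : List String) : pvAcore lines = pvGoL lines := by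
  induction lines with
  | nil => simp [pvAcore, pvFirstNonEmptyA, pvScanA, pvGoL]
  | cons l ls ih =>
      by_cases hl : PySem.Str.strip l = ""
      · by_cases hne : ∃ x ∈ ls, PySem.Str.strip x ≠ ""
        · -- first non-empty line is inside ls: A on l::ls reduces to A on ls
          have hshift : pvFirstNonEmptyA (l :: ls) 0 = pvFirstNonEmptyA ls 0 + 1 := by
            simp only [pvFirstNonEmptyA, if_pos hl]
            exact pvFirstNonEmptyA_shift ls 0 hne
          rw [pvGoL, if_pos hl, ← ih]
          simp only [pvAcore, hshift]
          have hget : (l :: ls).getD (pvFirstNonEmptyA ls 0 + 1) "" =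
              ls.getD (pvFirstNonEmptyA ls 0) "" := rfl
          rw [pvScanA_eq, pvScanA_eq]
          by_cases hc : pvFirstNonEmptyA ls 0 < ls.length ∧
              PySem.Str.strip (ls.getD (pvFirstNonEmptyA ls 0) "") = "---"
          · rw [if_pos ⟨by simpa using hc.1, by rw [hget]; exact hc.2⟩, if_pos hc]
            rfl
          · rw [if_neg (fun h => hc ⟨by simpa using h.1, by rw [← hget]; exact h.2⟩),
              if_neg hc]
            rfl
        · -- everything strips to empty: both sides are false
          push Not at hne
          have hall : ∀ x ∈ l :: ls, PySem.Str.strip x = "" := by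
            intro x hx
            rcases List.mem_cons.mp hx with h | h
            · exact h ▸ hl
            · exact hne x h
          have h0 : pvFirstNonEmptyA (l :: ls) 0 = 0 := pvFirstNonEmptyA_allEmpty _ _ hall
          have hcond : ¬ (0 < (l :: ls).length ∧
              PySem.Str.strip ((l :: ls).getD 0 "") = "---") := by
            rintro ⟨-, h⟩
            rw [show (l :: ls).getD 0 "" = l from rfl, hl] at h
            exact absurd h (by decide)
          simp only [pvAcore, h0]
          rw [if_neg hcond]
          rw [pvScanA_eq, pvGoL_allEmpty _ hall]
          simp only [List.drop_zero, List.any_eq_false]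
          intro x hx
          simp [hall x hx]
      · -- first line is non-empty: no induction needed
        have h0 : pvFirstNonEmptyA (l :: ls) 0 = 0 := by simp [pvFirstNonEmptyA, hl]
        have hget0 : (l :: ls).getD 0 "" = l := rfl
        by_cases hsep : PySem.Str.strip l = "---"
        · simp only [pvAcore, pvGoL, h0, hget0, if_neg hl, if_pos hsep]
          rw [if_pos ⟨by simp, hsep⟩, pvScanA_eq]
          rfl
        · simp only [pvAcore, pvGoL, h0, hget0, if_neg hl, if_neg hsep]
          rw [if_neg (fun h => hsep h.2), pvScanA_eq]
          rfl

-- pvGoL on the raw lines is the same skip-then-scan on the stripped lines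
def pvGoS : List String → Bool
  | [] => false
  | l :: ls =>
      if l = "" then pvGoS ls
      else if l = "---" then ls.any (fun x => x == "---")
      else (l :: ls).any (fun x => x == "---")

theorem pvGoL_eq_goS (lines : List String) : pvGoL lines = pvGoS (lines.map PySem.Str.strip) := by
  induction lines with
  | nil => rfl
  | cons l ls ih =>
      simp only [pvGoL, List.map_cons, pvGoS, ih, List.any_cons, List.any_map]
      rfl

-- the common characterization: some index j holds '---' with a non-empty line before it
def pvSep (s : List String) (j : Nat) : Prop :=
  s.getD j "" = "---" ∧ (s.take j).any (fun x => !(x == "")) = true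

theorem pvExists_getD_iff_any (ls : List String) :
    (∃ k, k < ls.length ∧ ls.getD k "" = "---") ↔ ls.any (fun x => x == "---") = true := by
  simp only [List.any_eq_true, beq_iff_eq]
  constructor
  · rintro ⟨k, hk, h⟩
    exact ⟨"---", by rw [← h, List.getD_eq_getElem ls "" hk]; exact ls.getElem_mem hk, rfl⟩
  · rintro ⟨x, hx, rfl⟩
    rcases List.mem_iff_getElem.mp hx with ⟨k, hk, hget⟩
    exact ⟨k, hk, by rw [List.getD_eq_getElem ls "" hk, hget]⟩

theorem pvScanB_iff (s : List String) (n : Nat) :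
    pvScanB s n = true ↔ ∃ j, j < n ∧ pvSep s j := by
  induction n with
  | zero => simp [pvScanB]
  | succ n ih =>
      by_cases h : s.getD n "" = "---"
      · simp only [pvScanB, if_pos h]
        constructor
        · intro hany
          exact ⟨n, Nat.lt_succ_self n, h, hany⟩
        · rintro ⟨j, hj, hget, hany⟩
          rcases Nat.lt_succ_iff_lt_or_eq.mp hj with hj' | rfl
          · -- take j is contained in take n
            rcases List.any_eq_true.mp hany with ⟨x, hx, hpx⟩
            refine List.any_eq_true.mpr ⟨x, ?_, hpx⟩
            have : s.take j = (s.take n).take j := by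
              rw [List.take_take, Nat.min_eq_left (Nat.le_of_lt hj')]
            exact List.take_subset j (s.take n) (this ▸ hx)
          · exact hany
      · simp only [pvScanB, if_neg h, ih]
        constructor
        · rintro ⟨j, hj, hsep⟩
          exact ⟨j, Nat.lt_succ_of_lt hj, hsep⟩
        · rintro ⟨j, hj, hsep⟩
          rcases Nat.lt_succ_iff_lt_or_eq.mp hj with hj' | rfl
          · exact ⟨j, hj', hsep⟩
          · exact absurd hsep.1 h
  
theorem pvSep_cons_succ (l : String) (ls : List String) (j : Nat) :
    pvSep (l :: ls) (j + 1) ↔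
      ls.getD j "" = "---" ∧ (l ≠ "" ∨ (ls.take j).any (fun x => !(x == "")) = true) := by
  simp only [pvSep, List.getD_cons_succ, List.take_succ_cons, List.any_cons,
    Bool.or_eq_true, Bool.not_eq_eq_eq_not, Bool.not_true, beq_eq_false_iff_ne]

theorem pvSep_cons_zero (l : String) (ls : List String) : ¬ pvSep (l :: ls) 0 := by
  simp [pvSep]

theorem pvExists_sep_cons (l : String) (ls : List String) :
    (∃ j, j < (l :: ls).length ∧ pvSep (l :: ls) j) ↔
      ∃ k, k < ls.length ∧ ls.getD k "" = "---" ∧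
        (l ≠ "" ∨ (ls.take k).any (fun x => !(x == "")) = true) := by
  constructor
  · rintro ⟨j, hj, hs⟩
    cases j with
    | zero => exact absurd hs (pvSep_cons_zero l ls)
    | succ k =>
        exact ⟨k, by simpa using hj, (pvSep_cons_succ l ls k).mp hs⟩
  · rintro ⟨k, hk, h⟩
    exact ⟨k + 1, by simpa using hk, (pvSep_cons_succ l ls k).mpr h⟩

theorem pvGoS_iff (s : List String) :
    pvGoS s = true ↔ ∃ j, j < s.length ∧ pvSep s j := by
  induction s with
  | nil => simp [pvGoS]
  | cons l ls ih =>
      rw [pvExists_sep_cons]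
      by_cases hl : l = ""
      · simp only [pvGoS]
        rw [if_pos hl, ih]
        simp [pvSep, hl, List.any_eq_true]
      · by_cases hsep : l = "---"
        · simp only [pvGoS, if_neg hl, if_pos hsep]
          rw [← pvExists_getD_iff_any]
          constructor
          · rintro ⟨k, hk, hget⟩
            exact ⟨k, hk, hget, Or.inl hl⟩
          · rintro ⟨k, hk, hget, -⟩
            exact ⟨k, hk, hget⟩
        · simp only [pvGoS, if_neg hl, if_neg hsep, List.any_cons,
            show (l == "---") = false from beq_eq_false_iff_ne.mpr hsep, Bool.false_or]
          rw [← pvExists_getD_iff_any]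
          constructor
          · rintro ⟨k, hk, hget⟩
            exact ⟨k, hk, hget, Or.inl hl⟩
          · rintro ⟨k, hk, hget, -⟩
            exact ⟨k, hk, hget⟩

theorem pvGoS_eq_scanB (s : List String) : pvGoS s = pvScanB s s.length := by
  rw [Bool.eq_iff_iff, pvGoS_iff, pvScanB_iff]

-- ===== VERDICT (by name: the statement is the Claim_ definition above) =====
theorem contains_multiple_documents_py_spec : Claim_equal_contains_multiple_documents_py := by
  intro content _
  show contains_multiple_documents_py content = contains_multiple_documents_py_alt content
  rw [contains_multiple_documents_py, contains_multiple_documents_py_alt,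
    pvAcore_eq_goL, pvGoL_eq_goS, pvGoS_eq_scanB]
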